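-- pv_equiv track=rewrite | github.com/Lama1kid/CS61A_Summer_2020 | 61a-su20-mt/poke.py | copycat
-- ===== SOURCE A (Python) =====
-- def copycat(lst1, lst2):
--     """
--     >>> copycat(['a', 'b', 'c'], [1, -1, 3])
--     ['c', 'c', 'c']
--     """
--     new_lst = []
--     def helper(index):
--         while index < min(len(lst1), len(lst2)):
--             if lst2[index] > 0:
--                 for _ in range(lst2[index]):
--                     new_lst.append(lst1[index])
--                 index += 1
--             elif lst2[index] == 0:
--                 index += 1
--             else:
--                 for _ in range(abs(lst2[index])):
--                     new_lst.pop()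
--                 index += 1
--         return new_lst
--     return helper(0)
-- ===== SOURCE B (Python) =====
-- def copycat(lst1, lst2):
--     """
--     >>> copycat(['a', 'b', 'c'], [1, -1, 3])
--     ['c', 'c', 'c']
--     """
--     # Run-length grouped stack: each entry [value, count]; pops decrement group
--     # counts instead of removing one element at a time.
--     groups = []
--     for v, n in zip(lst1, lst2):
--         if n > 0:
--             groups.append([v, n])
--         elif n < 0:
--             k = -n
--             while k > 0:
--                 top = groups[-1]  # IndexError here, like A's pop, on underflow
--                 if top[1] <= k:
--                     k -= top[1]
--                     groups.pop()
--                 else: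
--                     top[1] -= k
--                     k = 0
--     return [v for v, c in groups for _ in range(c)]
-- ===== Notes on version B (the rewrite author's own statement) =====
-- stated objective: alternative
-- what changed: Replaces A's element-by-element stack (append/pop one item per unit of lst2[i]) with a run-length grouped stack of (value,count) pairs: each positive entry is one push and each negative entry decrements group counts, the flat list being materialized only once at the end.
import Mathlib
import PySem

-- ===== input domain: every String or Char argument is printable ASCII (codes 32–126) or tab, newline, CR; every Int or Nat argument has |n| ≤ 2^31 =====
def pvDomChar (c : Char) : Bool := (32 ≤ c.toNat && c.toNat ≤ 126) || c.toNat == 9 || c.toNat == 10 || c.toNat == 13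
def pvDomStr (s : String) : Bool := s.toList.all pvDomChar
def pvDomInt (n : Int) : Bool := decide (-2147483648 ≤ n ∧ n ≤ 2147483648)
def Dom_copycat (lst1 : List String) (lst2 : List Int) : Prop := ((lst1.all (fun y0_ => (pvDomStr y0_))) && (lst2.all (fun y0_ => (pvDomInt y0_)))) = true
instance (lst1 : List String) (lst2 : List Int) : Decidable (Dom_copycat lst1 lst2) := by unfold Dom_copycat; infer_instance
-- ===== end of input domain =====

-- B replaces A's element-by-element stack with a run-length grouped stack
-- (push one (value,count) group per positive entry, pops decrement group
-- counts); an alternative algorithm with one push/pop-merge per entry of lst2.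

-- ===== PORT A =====
-- A's while-loop over 'index' with accumulator new_lst; fuel = remaining indices.
-- 'new_lst.pop()' on the empty list raises IndexError in Python; here it is
-- dropLast (a no-op on []) — exactly those inputs are excluded by Pre_copycat.
def copycatLoop (lst1 : List String) (lst2 : List Int) : Nat → Nat → List String → List String
  | 0, _, acc => acc
  | fuel + 1, index, acc =>
    let n := (PySem.List.pyGet? lst2 (index : Int)).getD 0
    if n > 0 then
      copycatLoop lst1 lst2 fuel (index + 1)
        (acc ++ List.replicate n.toNat ((PySem.List.pyGet? lst1 (index : Int)).getD ""))
    else if n = 0 then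
      copycatLoop lst1 lst2 fuel (index + 1) acc
    else
      copycatLoop lst1 lst2 fuel (index + 1) (List.dropLast^[n.natAbs] acc)

def copycat (lst1 : List String) (lst2 : List Int) : List String :=
  copycatLoop lst1 lst2 (min lst1.length lst2.length) 0 []

-- ===== PORT B =====
-- Source B's inner 'while k > 0' pop loop over the group stack (head = top group,
-- i.e. the end of Source B's Python list).
def popGroups : List (String × Int) → Int → List (String × Int)
  | [], _ => []
  | (v, c) :: rest, k =>
    if k > 0 then
      if c ≤ k then popGroups rest (k - c) else (v, c - k) :: rest
    else (v, c) :: rest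

def copycat_alt (lst1 : List String) (lst2 : List Int) : List String :=
  let groups := (lst1.zip lst2).foldl
    (fun gs vn =>
      if vn.2 > 0 then (vn.1, vn.2) :: gs
      else if vn.2 < 0 then popGroups gs (-vn.2)
      else gs) []
  groups.reverse.flatMap (fun p => List.replicate p.2.toNat p.1)

-- ===== PRECONDITION & SPEC =====
-- Pre_ excludes exactly the inputs where Python A raises IndexError (a pop on
-- the empty stack): some prefix of lst2 within the zipped range sums negative.
def Pre_copycat (lst1 : List String) (lst2 : List Int) : Prop :=
  ∀ k, k ≤ min lst1.length lst2.length → 0 ≤ (lst2.take k).sum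
instance (lst1 : List String) (lst2 : List Int) : Decidable (Pre_copycat lst1 lst2) := by
  unfold Pre_copycat; infer_instance
def pvWitness_copycat : List String × List Int := (["a", "b", "c"], [1, -1, 3])

def Spec_copycat (lst1 : List String) (lst2 : List Int) (out : List String) : Prop := out = copycat_alt lst1 lst2
instance (lst1 : List String) (lst2 : List Int) (out : List String) : Decidable (Spec_copycat lst1 lst2 out) := by unfold Spec_copycat; infer_instance

-- ===== CLAIM (what is proved, stated in full; the proofs are below) =====
def Claim_equal_copycat : Prop := ∀ (lst1 : List String) (lst2 : List Int), Dom_copycat lst1 lst2 → Pre_copycat lst1 lst2 → Spec_copycat lst1 lst2 (copycat lst1 lst2)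

-- ===== LEMMAS AND PROOFS =====

-- flatten a group stack (head = top) back to the flat stack (top = last)
def flat : List (String × Int) → List String
  | [] => []
  | (v, c) :: gs => flat gs ++ List.replicate c.toNat v

lemma reverse_flatMap_eq_flat (gs : List (String × Int)) :
    gs.reverse.flatMap (fun p => List.replicate p.2.toNat p.1) = flat gs := by
  induction gs with
  | nil => rfl
  | cons p gs ih => cases p; simp [flat, ← ih, List.flatMap_append]

lemma iterate_dropLast_append_replicate (v : String) :
    ∀ (n : Nat) (X : List String), List.dropLast^[n] (X ++ List.replicate n v) = X := by
  intro n
  induction n with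
  | zero => simp
  | succ n ih =>
    intro X
    rw [Function.iterate_succ_apply, List.replicate_succ', ← List.append_assoc,
      List.dropLast_concat, ih]

lemma pop_flat : ∀ (gs : List (String × Int)) (k : Int),
    (∀ p ∈ gs, 0 < p.2) →
    List.dropLast^[k.toNat] (flat gs) = flat (popGroups gs k) := by
  intro gs
  induction gs with
  | nil =>
    intro k _
    simp only [flat, popGroups]
    exact Function.iterate_fixed rfl _
  | cons p gs ih =>
    intro k hpos
    obtain ⟨v, c⟩ := p
    by_cases hk : k > 0
    · by_cases hck : c ≤ k
      · have hc : (0:Int) < c := hpos (v, c) (by simp)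
        have hsplit : k.toNat = c.toNat + (k - c).toNat := by omega
        rw [popGroups, if_pos hk, if_pos hck, hsplit, Nat.add_comm,
          Function.iterate_add_apply]
        rw [flat, iterate_dropLast_append_replicate]
        exact ih (k - c) (fun p hp => hpos p (List.mem_cons_of_mem _ hp))
      · -- partial pop of the top group
        push Not at hck
        have hc : (0:Int) < c := hpos (v, c) (by simp)
        rw [popGroups, if_pos hk, if_neg (by omega)]
        have hrepl : List.replicate c.toNat v
            = List.replicate (c - k).toNat v ++ List.replicate k.toNat v := by
          rw [← List.replicate_add]
          congr 1
          omega
        rw [flat, hrepl, ← List.append_assoc, iterate_dropLast_append_replicate, flat]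
    · have : k.toNat = 0 := by omega
      rw [popGroups, if_neg hk, this]
      simp
lemma pop_pos : ∀ (gs : List (String × Int)) (k : Int),
    (∀ p ∈ gs, 0 < p.2) → ∀ p ∈ popGroups gs k, 0 < p.2 := by
  intro gs
  induction gs with
  | nil => intro k _ p hp; simp [popGroups] at hp
  | cons q gs ih =>
    intro k hpos p hp
    obtain ⟨v, c⟩ := q
    have hc : (0:Int) < c := hpos (v, c) (by simp)
    rw [popGroups] at hp
    split_ifs at hp with h1 h2
    · exact ih (k - c) (fun p hp' => hpos p (List.mem_cons_of_mem _ hp')) p hp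
    · rcases List.mem_cons.1 hp with h | h
      · subst h; simp; omega
      · exact hpos p (List.mem_cons_of_mem _ h)
    · exact hpos p hp

lemma loop_eq (lst1 : List String) (lst2 : List Int) :
    ∀ (fuel index : Nat) (gs : List (String × Int)),
    index + fuel = min lst1.length lst2.length →
    (∀ p ∈ gs, 0 < p.2) →
    copycatLoop lst1 lst2 fuel index (flat gs)
      = flat (((lst1.zip lst2).drop index).foldl
          (fun gs vn =>
            if vn.2 > 0 then (vn.1, vn.2) :: gs
            else if vn.2 < 0 then popGroups gs (-vn.2)
            else gs) gs) := by
  intro fuel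
  induction fuel with
  | zero =>
    intro index gs hlen _
    have : (lst1.zip lst2).drop index = [] := by
      apply List.drop_eq_nil_of_le
      simp [List.length_zip]; omega
    simp [copycatLoop, this]
  | succ fuel ih =>
    intro index gs hlen hpos
    have hmin : index < min lst1.length lst2.length := by omega
    have h1 : index < lst1.length := by omega
    have h2 : index < lst2.length := by omega
    have hz : index < (lst1.zip lst2).length := by simp [List.length_zip]; omega
    have hdrop : (lst1.zip lst2).drop index
        = (lst1.zip lst2)[index] :: (lst1.zip lst2).drop (index + 1) :=
      (List.getElem_cons_drop hz).symm
    have hget : (lst1.zip lst2)[index] = (lst1[index], lst2[index]) := by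
      simp [List.getElem_zip]
    have hget1 : PySem.List.pyGet? lst1 (index : Int) = some lst1[index] :=
      PySem.List.pyGet?_ofNat lst1 index h1
    have hget2 : PySem.List.pyGet? lst2 (index : Int) = some lst2[index] :=
      PySem.List.pyGet?_ofNat lst2 index h2
    rw [hdrop, List.foldl_cons, hget]
    rw [copycatLoop]
    simp only [hget1, hget2, Option.getD_some]
    by_cases hp : lst2[index] > 0
    · rw [if_pos hp]
      have : flat gs ++ List.replicate (lst2[index]).toNat lst1[index]
          = flat ((lst1[index], lst2[index]) :: gs) := by simp [flat]
      rw [this, ih (index + 1) _ (by omega)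
        (by intro p hp'
            rcases List.mem_cons.1 hp' with h | h
            · subst h; simpa using hp
            · exact hpos p h)]
      simp [hp]
    · by_cases hz0 : lst2[index] = 0
      · rw [if_neg hp, if_pos hz0]
        rw [ih (index + 1) gs (by omega) hpos]
        simp [hz0]
      · rw [if_neg hp, if_neg hz0]
        have hneg : lst2[index] < 0 := by omega
        have habs : (lst2[index]).natAbs = (-lst2[index]).toNat := by omega
        rw [habs, pop_flat gs _ hpos,
          ih (index + 1) _ (by omega) (pop_pos gs _ hpos)]
        simp [hneg, if_neg hp]

-- ===== VERDICT (by name: the statement is the Claim_ definition above) =====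
theorem copycat_spec : Claim_equal_copycat := by
  intro lst1 lst2 _ _
  unfold Spec_copycat copycat copycat_alt
  rw [reverse_flatMap_eq_flat]
  have := loop_eq lst1 lst2 (min lst1.length lst2.length) 0 [] (by omega)
    (by intro p hp; simp at hp)
  simpa [flat] using this
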